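-- pv_equiv track=rewrite | github.com/VaniaAbbas01/MurickInternship2025 | Week 1/mathematicalSequenceGenerator.py | fibonacci_primes
-- ===== SOURCE A (Python) =====
-- def generate_fibonacci(limit):
--     fib = [0, 1]
--     while fib[-1] + fib[-2] <= limit:
--         fib.append(fib[-1] + fib[-2])
--     return fib
--
-- def generate_primes(limit):
--     primes = []
--     for num in range(2, limit + 1):
--         for i in range(2, int(num ** 0.5) + 1):
--             if num % i == 0:
--                 break
--         else:
--             primes.append(num)
--     return primes
--
-- def fibonacci_primes(limit):
--     fib = generate_fibonacci(limit)
--     primes = generate_primes(limit)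
--     list_ = []
--     for num in fib:
--         if num in primes:
--             list_.append(num)
--     return list_
-- ===== SOURCE B (Python) =====
-- def is_prime(n):
--     if n < 2:
--         return False
--     return all(n % i for i in range(2, int(n ** 0.5) + 1))
--
-- def fibonacci_primes(limit):
--     result = []
--     a, b = 1, 2
--     while b <= limit:
--         if is_prime(b):
--             result.append(b)
--         a, b = b, a + b
--     return result
-- ===== Notes on version B (the rewrite author's own statement) =====
-- stated objective: faster
-- what changed: Instead of generating the full list of primes up to limit by trial division and scanning it for each Fibonacci number, B walks the O(log limit) Fibonacci numbers with a rolling pair and primality-tests each one directly by trial division.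
import Mathlib
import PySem

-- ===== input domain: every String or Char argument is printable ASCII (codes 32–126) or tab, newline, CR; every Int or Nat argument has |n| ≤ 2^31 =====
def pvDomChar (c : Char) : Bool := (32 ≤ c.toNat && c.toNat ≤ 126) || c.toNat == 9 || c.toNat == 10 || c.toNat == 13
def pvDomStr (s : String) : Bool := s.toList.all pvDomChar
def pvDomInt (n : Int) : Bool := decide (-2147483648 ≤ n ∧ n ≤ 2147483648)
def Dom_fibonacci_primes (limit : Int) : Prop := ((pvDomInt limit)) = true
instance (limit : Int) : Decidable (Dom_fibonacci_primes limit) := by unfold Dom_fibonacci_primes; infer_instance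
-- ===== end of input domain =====

-- B replaces A's "build all primes up to limit, then scan" by directly primality-testing
-- each Fibonacci number (asymptotically faster; measured).


-- int(n ** 0.5): exact equal to the integer square root for 0 ≤ n ≤ 2^31
-- (float pow is exact enough in that range); both Pythons use this construct.
def pySqrt (n : Int) : Int := (Nat.sqrt n.toNat : Int)

-- ===== PORT A =====
-- while fib[-1] + fib[-2] <= limit: fib.append(...).  Fuel limit.toNat + 2 is a
-- totality guard only: appended values grow by ≥ 1 per step, so it is never exhausted.
-- fib always has ≥ 2 elements, so the .getD 0 after pyGet? is never used.
def genFibLoop (limit : Int) : Nat → List Int → List Int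
  | 0, fib => fib
  | n + 1, fib =>
    let x := (PySem.List.pyGet? fib (-1)).getD 0 + (PySem.List.pyGet? fib (-2)).getD 0
    if x ≤ limit then genFibLoop limit n (fib ++ [x]) else fib

def generate_fibonacci (limit : Int) : List Int :=
  genFibLoop limit (limit.toNat + 2) [0, 1]

def generate_primes (limit : Int) : List Int :=
  (PySem.List.pyRange 2 (limit + 1) 1).foldl
    (fun primes num =>
      if (PySem.List.pyRange 2 (pySqrt num + 1) 1).any (fun i => PySem.Int.mod num i == 0)
      then primes
      else primes ++ [num]) []

def fibonacci_primes (limit : Int) : List Int :=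
  let fib := generate_fibonacci limit
  let primes := generate_primes limit
  fib.foldl (fun list_ num => if primes.contains num then list_ ++ [num] else list_) []

-- ===== PORT B =====
def is_prime (n : Int) : Bool :=
  if n < 2 then false
  else (PySem.List.pyRange 2 (pySqrt n + 1) 1).all (fun i => PySem.Int.mod n i != 0)

-- while b <= limit with rolling pair (a, b); fuel limit.toNat + 2 is a totality
-- guard only (b grows by ≥ 1 per step).
def fibLoop (limit : Int) : Nat → Int → Int → List Int → List Int
  | 0, _, _, result => result
  | n + 1, a, b, result =>
    if b ≤ limit then
      fibLoop limit n b (a + b) (if is_prime b then result ++ [b] else result)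
    else result

def fibonacci_primes_alt (limit : Int) : List Int :=
  fibLoop limit (limit.toNat + 2) 1 2 []

-- ===== PRECONDITION & SPEC =====
def Spec_fibonacci_primes (limit : Int) (out : List Int) : Prop := out = fibonacci_primes_alt limit
instance (limit : Int) (out : List Int) : Decidable (Spec_fibonacci_primes limit out) := by unfold Spec_fibonacci_primes; infer_instance

-- ===== CLAIM (what is proved, stated in full; the proofs are below) =====
def Claim_equal_fibonacci_primes : Prop := ∀ (limit : Int), Dom_fibonacci_primes limit → Spec_fibonacci_primes limit (fibonacci_primes limit)

-- ===== LEMMAS AND PROOFS =====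

-- the values A's while-loop appends after the seed [0, 1]
def appended (limit : Int) : Nat → Int → Int → List Int
  | 0, _, _ => []
  | n + 1, a, b => if a + b ≤ limit then (a + b) :: appended limit n b (a + b) else []

theorem pyGet_neg_one_pair (l : List Int) (a b : Int) :
    (PySem.List.pyGet? (l ++ [a, b]) (-1)).getD 0 = b := by
  rw [PySem.List.pyGet?_neg_one]
  rw [show l ++ [a, b] = (l ++ [a]) ++ [b] by simp]
  simp

theorem pyGet_neg_two_pair (l : List Int) (a b : Int) :
    (PySem.List.pyGet? (l ++ [a, b]) (-2)).getD 0 = a := by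
  rw [PySem.List.pyGet?_neg_ofNat _ 2 (by omega) (by simp)]
  simp

theorem genFibLoop_eq_appended (limit : Int) (n : Nat) :
    ∀ (pre : List Int) (a b : Int),
      genFibLoop limit n (pre ++ [a, b]) = (pre ++ [a, b]) ++ appended limit n a b := by
  induction n with
  | zero => intro pre a b; simp [genFibLoop, appended]
  | succ n ih =>
    intro pre a b
    rw [genFibLoop, appended]
    simp only [pyGet_neg_one_pair, pyGet_neg_two_pair]
    by_cases h : b + a ≤ limit
    · rw [if_pos h, if_pos (by omega : a + b ≤ limit)]
      rw [show (pre ++ [a, b]) ++ [b + a] = (pre ++ [a]) ++ [b, b + a] by simp]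
      rw [ih (pre ++ [a]) b (b + a)]
      simp [show b + a = a + b by ring]
    · rw [if_neg h, if_neg (by omega : ¬ a + b ≤ limit)]
      simp

theorem mem_generate_primes (limit x : Int) :
    (generate_primes limit).contains x = true ↔
      2 ≤ x ∧ x < limit + 1 ∧
        (PySem.List.pyRange 2 (pySqrt x + 1) 1).all (fun i => PySem.Int.mod x i != 0) = true := by
  unfold generate_primes
  rw [show (fun (primes : List Int) num =>
      if (PySem.List.pyRange 2 (pySqrt num + 1) 1).any (fun i => PySem.Int.mod num i == 0)
      then primes
      else primes ++ [num]) = (fun primes num =>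
      if (PySem.List.pyRange 2 (pySqrt num + 1) 1).all (fun i => PySem.Int.mod num i != 0)
      then primes ++ [num]
      else primes) by
    funext primes num
    rw [show ((PySem.List.pyRange 2 (pySqrt num + 1) 1).all (fun i => PySem.Int.mod num i != 0))
        = !((PySem.List.pyRange 2 (pySqrt num + 1) 1).any (fun i => PySem.Int.mod num i == 0)) by
      simp [List.all_eq_not_any_not, bne, Bool.not_not]]
    cases (PySem.List.pyRange 2 (pySqrt num + 1) 1).any (fun i => PySem.Int.mod num i == 0) <;> simp]
  rw [PySem.List.foldl_append_if_eq_filter]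
  simp [List.mem_filter, PySem.List.mem_pyRange_one]
  tauto

theorem contains_eq_is_prime (limit x : Int) (h2 : 2 ≤ x) (hle : x ≤ limit) :
    (generate_primes limit).contains x = is_prime x := by
  unfold is_prime
  rw [if_neg (by omega : ¬ x < 2)]
  cases hall : (PySem.List.pyRange 2 (pySqrt x + 1) 1).all (fun i => PySem.Int.mod x i != 0) with
  | true => exact (mem_generate_primes limit x).mpr ⟨h2, by omega, hall⟩
  | false =>
    by_contra hc
    have := (mem_generate_primes limit x).mp (by
      cases hcc : (generate_primes limit).contains x
      · exact absurd hcc hc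
      · rfl)
    rw [hall] at this
    exact absurd this.2.2 (by simp)

theorem foldl_appended_eq_fibLoop (limit : Int) (n : Nat) :
    ∀ (a b : Int) (acc : List Int), 1 ≤ a → 1 ≤ b →
      List.foldl (fun list_ num => if (generate_primes limit).contains num then list_ ++ [num] else list_)
        acc (appended limit n a b) = fibLoop limit n b (a + b) acc := by
  induction n with
  | zero => intro a b acc _ _; simp [appended, fibLoop]
  | succ n ih =>
    intro a b acc ha hb
    rw [appended, fibLoop]
    by_cases h : a + b ≤ limit
    · rw [if_pos h, if_pos h]
      rw [List.foldl_cons]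
      rw [contains_eq_is_prime limit (a + b) (by omega) h]
      rw [ih b (a + b) _ hb (by omega)]
    · rw [if_neg h, if_neg h]
      simp

theorem fibLoop_fuel_irrel (limit : Int) (n : Nat) :
    ∀ (m : Nat) (a b : Int) (acc : List Int), 1 ≤ a → a ≤ b →
      limit < b + n → limit < b + m →
      fibLoop limit n a b acc = fibLoop limit m a b acc := by
  induction n with
  | zero =>
    intro m a b acc ha hab hn hm
    cases m with
    | zero => rfl
    | succ m => rw [fibLoop, fibLoop, if_neg (by omega)]
  | succ n ih =>
    intro m a b acc ha hab hn hm
    cases m with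
    | zero => rw [fibLoop, fibLoop, if_neg (by omega)]
    | succ m =>
      rw [fibLoop, fibLoop]
      by_cases h : b ≤ limit
      · rw [if_pos h, if_pos h]
        exact ih m b (a + b) _ (by omega) (by omega) (by omega) (by omega)
      · rw [if_neg h, if_neg h]

-- ===== VERDICT (by name: the statement is the Claim_ definition above) =====
theorem fibonacci_primes_spec : Claim_equal_fibonacci_primes := by
  intro limit _
  unfold Spec_fibonacci_primes fibonacci_primes fibonacci_primes_alt generate_fibonacci
  rw [show ([0, 1] : List Int) = [] ++ [0, 1] from rfl, genFibLoop_eq_appended]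
  have h0 : (generate_primes limit).contains 0 = false := by
    cases hc : (generate_primes limit).contains 0
    · rfl
    · have := (mem_generate_primes limit 0).mp hc; omega
  have h1 : (generate_primes limit).contains 1 = false := by
    cases hc : (generate_primes limit).contains 1
    · rfl
    · have := (mem_generate_primes limit 1).mp hc; omega
  rw [List.nil_append, List.cons_append, List.cons_append, List.nil_append,
      List.foldl_cons, List.foldl_cons]
  simp only [h0, h1, Bool.false_eq_true, if_false]
  rw [show limit.toNat + 2 = (limit.toNat + 1) + 1 from rfl, appended]
  simp only [show (0 : Int) + 1 = 1 from by norm_num]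
  by_cases hl : (1 : Int) ≤ limit
  · rw [if_pos hl, List.foldl_cons]
    simp only [h1, Bool.false_eq_true, if_false]
    rw [foldl_appended_eq_fibLoop limit (limit.toNat + 1) 1 1 [] le_rfl le_rfl]
    exact fibLoop_fuel_irrel limit (limit.toNat + 1) (limit.toNat + 1 + 1) 1 (1 + 1) []
      (by omega) (by omega) (by omega) (by omega)
  · rw [if_neg hl, List.foldl_nil, fibLoop, if_neg (by omega)]
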